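-- pv_equiv track=rewrite | github.com/rahul-challa/ML-Runtime-Profiler | compare_onnx.py | _generate_sample_texts
-- ===== SOURCE A (Python) =====
-- from typing import List, Dict, Any
--
-- def _generate_sample_texts(num_samples: int) -> List[str]:
--     """Generate sample texts for comparison."""
--     sample_texts = [
--         "This is a sample text for performance comparison.",
--         "The quick brown fox jumps over the lazy dog.",
--         "Machine learning models require careful optimization.",
--         "Transformer architectures have revolutionized NLP.",
--         "ONNX Runtime provides optimized inference.",
--         "PyTorch offers flexible model development.",
--         "Performance comparison helps choose the right tool.",
--         "Batch processing improves throughput significantly.",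
--         "Memory usage varies between frameworks.",
--         "Inference speed is critical for production deployment."
--     ]
--
--     # Repeat to get desired number of samples
--     texts = []
--     for i in range(num_samples):
--         text = sample_texts[i % len(sample_texts)]
--         texts.append(text)
--
--     return texts
-- ===== SOURCE B (Python) =====
-- def _generate_sample_texts(num_samples: int):
--     """Generate sample texts for comparison."""
--     sample_texts = [
--         "This is a sample text for performance comparison.",
--         "The quick brown fox jumps over the lazy dog.",
--         "Machine learning models require careful optimization.",
--         "Transformer architectures have revolutionized NLP.",
--         "ONNX Runtime provides optimized inference.",
--         "PyTorch offers flexible model development.",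
--         "Performance comparison helps choose the right tool.",
--         "Batch processing improves throughput significantly.",
--         "Memory usage varies between frameworks.",
--         "Inference speed is critical for production deployment."
--     ]
--     n = max(0, num_samples)
--     reps = n // len(sample_texts) + 1
--     return (sample_texts * reps)[:n]
-- ===== Notes on version B (the rewrite author's own statement) =====
-- stated objective: simpler
-- what changed: Replaces the index loop with modular lookup by building the repeated list up front (sample_texts * (n//10 + 1)) and slicing it to max(0, num_samples).
import Mathlib
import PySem

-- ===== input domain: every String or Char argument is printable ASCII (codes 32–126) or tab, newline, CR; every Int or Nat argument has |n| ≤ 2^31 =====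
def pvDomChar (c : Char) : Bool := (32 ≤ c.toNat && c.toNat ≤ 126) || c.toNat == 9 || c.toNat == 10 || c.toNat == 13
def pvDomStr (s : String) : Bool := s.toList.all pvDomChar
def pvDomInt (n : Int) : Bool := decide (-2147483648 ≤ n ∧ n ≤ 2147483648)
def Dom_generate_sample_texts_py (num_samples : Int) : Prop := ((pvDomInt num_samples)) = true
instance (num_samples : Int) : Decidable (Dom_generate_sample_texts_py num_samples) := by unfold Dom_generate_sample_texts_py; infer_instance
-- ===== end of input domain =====

-- B builds the repeated list up front (sample_texts * (n//10 + 1)) and slices it, instead of A's index loop with i % len; objective: simpler.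


def pvSampleTexts : List String :=
  [ "This is a sample text for performance comparison.",
    "The quick brown fox jumps over the lazy dog.",
    "Machine learning models require careful optimization.",
    "Transformer architectures have revolutionized NLP.",
    "ONNX Runtime provides optimized inference.",
    "PyTorch offers flexible model development.",
    "Performance comparison helps choose the right tool.",
    "Batch processing improves throughput significantly.",
    "Memory usage varies between frameworks.",
    "Inference speed is critical for production deployment." ]

-- ===== PORT A =====
-- texts = []; for i in range(num_samples): texts.append(sample_texts[i % len(sample_texts)])
def generate_sample_texts_py (num_samples : Int) : List String :=
  (PySem.List.pyRange 0 num_samples 1).foldl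
    (fun texts i => texts ++ [PySem.List.pyGetD pvSampleTexts (PySem.Int.mod i (pvSampleTexts.length : Int)) ""])
    []

-- ===== PORT B =====
-- n = max(0, num_samples); reps = n // 10 + 1; return (sample_texts * reps)[:n]
def generate_sample_texts_py_alt (num_samples : Int) : List String :=
  ((List.replicate (PySem.Int.floordiv (max 0 num_samples) (pvSampleTexts.length : Int) + 1).toNat
      pvSampleTexts).flatten).take (max 0 num_samples).toNat

-- ===== PRECONDITION & SPEC =====
def Spec_generate_sample_texts_py (num_samples : Int) (out : List String) : Prop := out = generate_sample_texts_py_alt num_samples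
instance (num_samples : Int) (out : List String) : Decidable (Spec_generate_sample_texts_py num_samples out) := by unfold Spec_generate_sample_texts_py; infer_instance

-- ===== CLAIM (what is proved, stated in full; the proofs are below) =====
def Claim_equal_generate_sample_texts_py : Prop := ∀ (num_samples : Int), Dom_generate_sample_texts_py num_samples → Spec_generate_sample_texts_py num_samples (generate_sample_texts_py num_samples)

-- ===== LEMMAS AND PROOFS =====

-- prefix of a list equals lookup of the first m positions
theorem take_eq_map_range_getD {α : Type} (d : α) :
    ∀ (l : List α) (m : Nat), m ≤ l.length →
      l.take m = (List.range m).map (fun i => l.getD i d) := by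
  intro l
  induction l with
  | nil => intro m hm; simp_all
  | cons a t ih =>
    intro m hm
    cases m with
    | zero => simp
    | succ m' =>
      simp only [List.take_succ_cons, List.range_succ_eq_map, List.map_cons, List.map_map]
      simp only [List.length_cons, Nat.succ_le_succ_iff] at hm
      have := ih m' hm
      simp [List.getD, this, Function.comp]

-- the flattened replication, cut to m elements, is the cyclic lookup list
theorem take_flatten_replicate :
    ∀ (k m : Nat), m ≤ 10 * k →
      ((List.replicate k pvSampleTexts).flatten).take m
        = (List.range m).map (fun i => pvSampleTexts.getD (i % 10) "") := by
  intro k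
  induction k with
  | zero => intro m hm; have : m = 0 := by omega
            subst this; simp
  | succ k' ih =>
    intro m hm
    rw [List.replicate_succ, List.flatten_cons]
    by_cases hsmall : m ≤ 10
    · rw [List.take_append_of_le_length (by simp [pvSampleTexts]; omega)]
      rw [take_eq_map_range_getD "" pvSampleTexts m (by simp [pvSampleTexts]; omega)]
      apply List.map_congr_left
      intro i hi
      simp only [List.mem_range] at hi
      have : i % 10 = i := Nat.mod_eq_of_lt (by omega)
      rw [this]
    · have hm10 : 10 ≤ m := by omega
      obtain ⟨r, hr⟩ : ∃ r, m = 10 + r := ⟨m - 10, by omega⟩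
      subst hr
      have hlen : pvSampleTexts.length = 10 := by simp [pvSampleTexts]
      rw [List.take_append, List.take_of_length_le (by omega : pvSampleTexts.length ≤ 10 + r),
          hlen]
      have : 10 + r - 10 = r := by omega
      rw [this, ih r (by omega), List.range_add]
      rw [List.map_append, List.map_map]
      congr 1
      apply List.map_congr_left
      intro i _
      simp [Function.comp, Nat.add_mod_left]

-- ===== VERDICT (by name: the statement is the Claim_ definition above) =====
theorem generate_sample_texts_py_spec : Claim_equal_generate_sample_texts_py := by
  intro num_samples _
  unfold Spec_generate_sample_texts_py generate_sample_texts_py generate_sample_texts_py_alt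
  by_cases hneg : num_samples ≤ 0
  · have h1 : PySem.List.pyRange 0 num_samples 1 = [] := by
      rw [PySem.List.pyRange_zero]
      have : num_samples.toNat = 0 := by omega
      simp [this]
    have h2 : max 0 num_samples = 0 := by omega
    simp [h1, h2]
  · obtain ⟨m, hm⟩ : ∃ m : Nat, num_samples = (m : Int) := ⟨num_samples.toNat, by omega⟩
    subst hm
    rw [PySem.List.pyRange_zero_natCast, PySem.List.foldl_append_singleton_eq_map, List.map_map]
    have hmax : max 0 ((m : Nat) : Int) = (m : Int) := by omega
    have hlen : (pvSampleTexts.length : Int) = ((10 : Nat) : Int) := by simp [pvSampleTexts]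
    rw [hmax, hlen, PySem.Int.floordiv_natCast]
    have hreps : (((m / 10 : Nat) : Int) + 1).toNat = m / 10 + 1 := by omega
    have hto : ((m : Int)).toNat = m := by omega
    rw [hreps, hto, take_flatten_replicate (m / 10 + 1) m (by omega)]
    apply List.map_congr_left
    intro i _
    simp only [Function.comp]
    rw [PySem.Int.mod_natCast, PySem.List.pyGetD_natCast]
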